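-- pv_equiv track=rewrite | github.com/bocaj88/kindly-sourced-paper | settings.py | is_valid_wishlist_url
-- ===== SOURCE A (Python) =====
-- def is_valid_wishlist_url(url: str) -> bool:
--     """Validate if a URL looks like an Amazon wishlist URL"""
--     if not url or not isinstance(url, str):
--         return False
--
--     # Check if it's an Amazon wishlist URL
--     valid_patterns = [
--         'amazon.com/hz/wishlist/ls/',
--         'amazon.co.uk/hz/wishlist/ls/',
--         'amazon.ca/hz/wishlist/ls/',
--         'amazon.de/hz/wishlist/ls/',
--         'amazon.fr/hz/wishlist/ls/',
--         'amazon.it/hz/wishlist/ls/',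
--         'amazon.es/hz/wishlist/ls/',
--         'amazon.com.au/hz/wishlist/ls/',
--         'amazon.co.jp/hz/wishlist/ls/'
--     ]
--
--     return any(pattern in url.lower() for pattern in valid_patterns)
-- ===== SOURCE B (Python) =====
-- def is_valid_wishlist_url(url: str) -> bool:
--     """Validate if a URL looks like an Amazon wishlist URL.
--
--     One pass over the candidate positions: at each index j, check that the
--     shared path suffix '/hz/wishlist/ls/' starts there and that the text
--     before j ends with one of the accepted amazon domains.
--     """
--     if not url or not isinstance(url, str):
--         return False
--
--     u = url.lower()
--     suffix = '/hz/wishlist/ls/'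
--     domains = ['amazon.' + tld for tld in
--                ('com', 'co.uk', 'ca', 'de', 'fr', 'it', 'es', 'com.au', 'co.jp')]
--     return any(u.startswith(suffix, j) and any(u.endswith(d, 0, j) for d in domains)
--                for j in range(len(u)))
-- ===== Notes on version B (the rewrite author's own statement) =====
-- stated objective: alternative
-- what changed: Instead of nine independent full-pattern substring scans (one 'pattern in url' per domain), B makes a single scan over the positions of the lowercased URL, testing at each position whether the shared wishlist path suffix starts there and the preceding text ends with one of the nine accepted amazon domains.
import Mathlib
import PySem

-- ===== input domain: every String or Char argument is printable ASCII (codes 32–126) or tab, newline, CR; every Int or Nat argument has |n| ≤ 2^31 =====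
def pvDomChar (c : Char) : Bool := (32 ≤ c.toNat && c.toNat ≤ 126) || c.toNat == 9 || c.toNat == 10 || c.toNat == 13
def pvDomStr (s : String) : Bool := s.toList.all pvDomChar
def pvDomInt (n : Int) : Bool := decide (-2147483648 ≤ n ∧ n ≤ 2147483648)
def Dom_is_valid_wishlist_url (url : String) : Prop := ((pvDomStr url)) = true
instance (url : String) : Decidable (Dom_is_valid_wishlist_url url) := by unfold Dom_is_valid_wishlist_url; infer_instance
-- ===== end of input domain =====

-- B replaces A's nine independent 'pattern in url.lower()' scans by one scan over the
-- positions of the lowercased URL, testing at each position whether the shared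
-- wishlist path suffix starts there and the text before it ends with an accepted
-- amazon domain (objective: alternative; same result, no speed claim).

-- ===== PORT A =====
def is_valid_wishlist_url (url : String) : Bool :=
  -- if not url (isinstance is always true under the type convention)
  if url == "" then false
  else
    let valid_patterns : List String :=
      [ "amazon.com/hz/wishlist/ls/",
        "amazon.co.uk/hz/wishlist/ls/",
        "amazon.ca/hz/wishlist/ls/",
        "amazon.de/hz/wishlist/ls/",
        "amazon.fr/hz/wishlist/ls/",
        "amazon.it/hz/wishlist/ls/",
        "amazon.es/hz/wishlist/ls/",
        "amazon.com.au/hz/wishlist/ls/",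
        "amazon.co.jp/hz/wishlist/ls/" ]
    valid_patterns.any (fun pattern => PySem.Str.isIn pattern (PySem.Str.lower url))

-- ===== PORT B =====
def is_valid_wishlist_url_alt (url : String) : Bool :=
  if url == "" then false
  else
    let u := PySem.Str.lower url
    let domains : List String :=
      (["com", "co.uk", "ca", "de", "fr", "it", "es", "com.au", "co.jp"]).map
        (fun tld => "amazon." ++ tld)
    (PySem.List.pyRange 0 (PySem.Str.len u) 1).any (fun j =>
      -- u.startswith('/hz/wishlist/ls/', j): hand-ported (PySem.Str.startswith has no
      -- start argument); exact for 0 ≤ j ≤ len(u): prefix test on the text from j on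
      PySem.Chars.startswith (u.toList.drop j.toNat) "/hz/wishlist/ls/".toList
      && domains.any (fun d =>
        -- u.endswith(d, 0, j): hand-ported likewise; exact for 0 ≤ j ≤ len(u):
        -- suffix test on the text before j
        PySem.Chars.endswith (u.toList.take j.toNat) d.toList))

-- ===== PRECONDITION & SPEC =====
def Spec_is_valid_wishlist_url (url : String) (out : Bool) : Prop := out = is_valid_wishlist_url_alt url
instance (url : String) (out : Bool) : Decidable (Spec_is_valid_wishlist_url url out) := by unfold Spec_is_valid_wishlist_url; infer_instance

-- ===== CLAIM (what is proved, stated in full; the proofs are below) =====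
def Claim_equal_is_valid_wishlist_url : Prop := ∀ (url : String), Dom_is_valid_wishlist_url url → Spec_is_valid_wishlist_url url (is_valid_wishlist_url url)

-- ===== LEMMAS AND PROOFS =====

def pvSfx : List Char := "/hz/wishlist/ls/".toList

-- (d ++ sfx) occurs in u  ↔  at some position j, sfx starts and some text ending in d precedes.
theorem pv_key (u d : List Char) :
    (d ++ pvSfx) <:+: u ↔ ∃ j : Nat, j < u.length ∧ pvSfx <+: u.drop j ∧ d <:+ u.take j := by
  constructor
  · rintro ⟨s, t, h⟩
    refine ⟨(s ++ d).length, ?_, ?_, ?_⟩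
    · have : u.length = s.length + d.length + pvSfx.length + t.length := by
        simp [← h]; omega
      have hs : 0 < pvSfx.length := by decide
      simp only [List.length_append]
      omega
    · have hu : u = (s ++ d) ++ (pvSfx ++ t) := by rw [← h]; simp
      rw [hu, List.drop_left]
      exact List.prefix_append _ _
    · have hu : u = (s ++ d) ++ (pvSfx ++ t) := by rw [← h]; simp
      rw [hu, List.take_left]
      exact List.suffix_append _ _
  · rintro ⟨j, _, ⟨t, ht⟩, ⟨s, hs⟩⟩
    refine ⟨s, t, ?_⟩
    have hu : u = u.take j ++ u.drop j := (List.take_append_drop j u).symm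
    rw [hu, ← ht, ← hs]
    simp

theorem pv_fwd (L d : List Char) (hd : (d ++ pvSfx) <:+: L) :
    ∃ j : ℤ, (0 ≤ j ∧ j < (L.length : ℤ)) ∧ pvSfx <+: L.drop j.toNat ∧ d <:+ L.take j.toNat := by
  obtain ⟨j, hj, h1, h2⟩ := (pv_key L d).mp hd
  exact ⟨(j : ℤ), ⟨Int.natCast_nonneg j, by exact_mod_cast hj⟩, by simpa using h1, by simpa using h2⟩

theorem pv_bwd (L d : List Char) (j : ℤ)
    (h1 : pvSfx <+: L.drop j.toNat) (h2 : d <:+ L.take j.toNat) :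
    (d ++ pvSfx) <:+: L := by
  rcases h1 with ⟨t, ht⟩
  rcases h2 with ⟨s, hs⟩
  refine ⟨s, t, ?_⟩
  have hu : L = L.take j.toNat ++ L.drop j.toNat := (List.take_append_drop _ L).symm
  rw [hu, ← ht, ← hs]
  simp

theorem pv_main (url : String) : is_valid_wishlist_url url = is_valid_wishlist_url_alt url := by
  unfold is_valid_wishlist_url is_valid_wishlist_url_alt
  split
  · rfl
  · rw [Bool.eq_iff_iff]
    simp only [List.any_cons, List.any_nil, Bool.or_eq_true, Bool.or_false,
      List.any_eq_true, PySem.Str.isIn_iff_infix,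
      PySem.Chars.startswith_iff, PySem.Chars.endswith_iff,
      PySem.Str.len_eq, PySem.List.mem_pyRange_one,
      List.map_cons, List.map_nil,
      String.toList_append, Bool.and_eq_true]
    set L := (PySem.Str.lower url).toList with hL
    have e1 : ("amazon.com/hz/wishlist/ls/" : String).toList = "amazon.com".toList ++ pvSfx := by decide
    have e2 : ("amazon.co.uk/hz/wishlist/ls/" : String).toList = "amazon.co.uk".toList ++ pvSfx := by decide
    have e3 : ("amazon.ca/hz/wishlist/ls/" : String).toList = "amazon.ca".toList ++ pvSfx := by decide
    have e4 : ("amazon.de/hz/wishlist/ls/" : String).toList = "amazon.de".toList ++ pvSfx := by decide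
    have e5 : ("amazon.fr/hz/wishlist/ls/" : String).toList = "amazon.fr".toList ++ pvSfx := by decide
    have e6 : ("amazon.it/hz/wishlist/ls/" : String).toList = "amazon.it".toList ++ pvSfx := by decide
    have e7 : ("amazon.es/hz/wishlist/ls/" : String).toList = "amazon.es".toList ++ pvSfx := by decide
    have e8 : ("amazon.com.au/hz/wishlist/ls/" : String).toList = "amazon.com.au".toList ++ pvSfx := by decide
    have e9 : ("amazon.co.jp/hz/wishlist/ls/" : String).toList = "amazon.co.jp".toList ++ pvSfx := by decide
    have d1 : ("amazon." : String).toList ++ ("com" : String).toList = "amazon.com".toList := by decide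
    have d2 : ("amazon." : String).toList ++ ("co.uk" : String).toList = "amazon.co.uk".toList := by decide
    have d3 : ("amazon." : String).toList ++ ("ca" : String).toList = "amazon.ca".toList := by decide
    have d4 : ("amazon." : String).toList ++ ("de" : String).toList = "amazon.de".toList := by decide
    have d5 : ("amazon." : String).toList ++ ("fr" : String).toList = "amazon.fr".toList := by decide
    have d6 : ("amazon." : String).toList ++ ("it" : String).toList = "amazon.it".toList := by decide
    have d7 : ("amazon." : String).toList ++ ("es" : String).toList = "amazon.es".toList := by decide
    have d8 : ("amazon." : String).toList ++ ("com.au" : String).toList = "amazon.com.au".toList := by decide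
    have d9 : ("amazon." : String).toList ++ ("co.jp" : String).toList = "amazon.co.jp".toList := by decide
    have esfx : ("/hz/wishlist/ls/" : String).toList = pvSfx := by decide
    rw [e1, e2, e3, e4, e5, e6, e7, e8, e9, d1, d2, d3, d4, d5, d6, d7, d8, d9, esfx]
    constructor
    · rintro (h | h | h | h | h | h | h | h | h)
      · obtain ⟨j, ⟨h0, hj⟩, h1, h2⟩ := pv_fwd L _ h
        exact ⟨j, ⟨h0, hj⟩, h1, Or.inl h2⟩
      · obtain ⟨j, ⟨h0, hj⟩, h1, h2⟩ := pv_fwd L _ h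
        exact ⟨j, ⟨h0, hj⟩, h1, Or.inr (Or.inl h2)⟩
      · obtain ⟨j, ⟨h0, hj⟩, h1, h2⟩ := pv_fwd L _ h
        exact ⟨j, ⟨h0, hj⟩, h1, Or.inr (Or.inr (Or.inl h2))⟩
      · obtain ⟨j, ⟨h0, hj⟩, h1, h2⟩ := pv_fwd L _ h
        exact ⟨j, ⟨h0, hj⟩, h1, Or.inr (Or.inr (Or.inr (Or.inl h2)))⟩
      · obtain ⟨j, ⟨h0, hj⟩, h1, h2⟩ := pv_fwd L _ h
        exact ⟨j, ⟨h0, hj⟩, h1, Or.inr (Or.inr (Or.inr (Or.inr (Or.inl h2))))⟩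
      · obtain ⟨j, ⟨h0, hj⟩, h1, h2⟩ := pv_fwd L _ h
        exact ⟨j, ⟨h0, hj⟩, h1, Or.inr (Or.inr (Or.inr (Or.inr (Or.inr (Or.inl h2)))))⟩
      · obtain ⟨j, ⟨h0, hj⟩, h1, h2⟩ := pv_fwd L _ h
        exact ⟨j, ⟨h0, hj⟩, h1, Or.inr (Or.inr (Or.inr (Or.inr (Or.inr (Or.inr (Or.inl h2))))))⟩
      · obtain ⟨j, ⟨h0, hj⟩, h1, h2⟩ := pv_fwd L _ h
        exact ⟨j, ⟨h0, hj⟩, h1, Or.inr (Or.inr (Or.inr (Or.inr (Or.inr (Or.inr (Or.inr (Or.inl h2)))))))⟩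
      · obtain ⟨j, ⟨h0, hj⟩, h1, h2⟩ := pv_fwd L _ h
        exact ⟨j, ⟨h0, hj⟩, h1, Or.inr (Or.inr (Or.inr (Or.inr (Or.inr (Or.inr (Or.inr (Or.inr h2)))))))⟩
    · rintro ⟨j, ⟨h0, hj⟩, h1, h2⟩
      rcases h2 with h2 | h2 | h2 | h2 | h2 | h2 | h2 | h2 | h2
      · exact Or.inl (pv_bwd L _ j h1 h2)
      · exact Or.inr (Or.inl (pv_bwd L _ j h1 h2))
      · exact Or.inr (Or.inr (Or.inl (pv_bwd L _ j h1 h2)))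
      · exact Or.inr (Or.inr (Or.inr (Or.inl (pv_bwd L _ j h1 h2))))
      · exact Or.inr (Or.inr (Or.inr (Or.inr (Or.inl (pv_bwd L _ j h1 h2)))))
      · exact Or.inr (Or.inr (Or.inr (Or.inr (Or.inr (Or.inl (pv_bwd L _ j h1 h2))))))
      · exact Or.inr (Or.inr (Or.inr (Or.inr (Or.inr (Or.inr (Or.inl (pv_bwd L _ j h1 h2)))))))
      · exact Or.inr (Or.inr (Or.inr (Or.inr (Or.inr (Or.inr (Or.inr (Or.inl (pv_bwd L _ j h1 h2))))))))
      · exact Or.inr (Or.inr (Or.inr (Or.inr (Or.inr (Or.inr (Or.inr (Or.inr (pv_bwd L _ j h1 h2))))))))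

-- ===== VERDICT (by name: the statement is the Claim_ definition above) =====
theorem is_valid_wishlist_url_spec : Claim_equal_is_valid_wishlist_url := by
  intro url _
  unfold Spec_is_valid_wishlist_url
  exact pv_main url
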